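-- pv_equiv track=rewrite | github.com/ModPunchtree/URCLBot | genericURCLOptimiser/genericURCLOptimiser.py | STRPOP
-- ===== SOURCE A (Python) =====
-- def STRPOP(code: list) -> list:
--     for i, j in enumerate(code):
--         if i == len(code) - 1:
--             break
--         if j.startswith("STR SP, ") and code[i + 1].startswith("POP"):
--             code[i] = "MOV " + code[i + 1][4: ] + ", " + j[j.find(",") + 2: ]
--             code[i + 1] = "INC SP, SP"
--             return STRPOP(code)
--     return code
-- ===== SOURCE B (Python) =====
-- def STRPOP(code: list) -> list:
--     # Single forward pass, mutating in place; no restart from the beginning.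
--     i = 0
--     n = len(code)
--     while i + 1 < n:
--         if code[i].startswith("STR SP, ") and code[i + 1].startswith("POP"):
--             code[i] = "MOV " + code[i + 1][4:] + ", " + code[i][8:]
--             code[i + 1] = "INC SP, SP"
--             i += 2
--         else:
--             i += 1
--     return code
-- ===== Notes on version B (the rewrite author's own statement) =====
-- stated objective: alternative
-- what changed: A restarts its scan from the beginning of the list (via recursion) after every rewrite; B makes one forward pass mutating in place, which is exact because a rewrite ('MOV ...'/'INC SP, SP') can never form a new STR-SP/POP pair with its neighbours.
import Mathlib
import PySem

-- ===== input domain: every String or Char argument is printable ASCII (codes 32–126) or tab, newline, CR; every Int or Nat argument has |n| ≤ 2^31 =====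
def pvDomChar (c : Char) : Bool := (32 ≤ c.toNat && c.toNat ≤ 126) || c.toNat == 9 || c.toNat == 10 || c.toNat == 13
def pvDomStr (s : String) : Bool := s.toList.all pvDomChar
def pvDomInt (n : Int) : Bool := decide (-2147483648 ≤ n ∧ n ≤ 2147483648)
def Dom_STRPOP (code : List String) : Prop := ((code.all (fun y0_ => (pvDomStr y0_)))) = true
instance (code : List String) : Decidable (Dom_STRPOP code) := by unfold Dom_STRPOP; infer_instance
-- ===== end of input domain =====

-- ===== PORT A =====
-- B is a single forward pass instead of A's restart-from-scratch recursion; equivalence is about the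
-- return value (the Python versions mutate `code` in place; both end with the same list contents).

-- A's rewritten instruction: "MOV " + code[i+1][4:] + ", " + j[j.find(",") + 2:]
def aMov (x y : String) : String :=
  String.ofList ("MOV ".toList ++ PySem.Chars.slice y.toList (some 4) none ++ ", ".toList
    ++ PySem.Chars.slice x.toList (some (PySem.Chars.find x.toList [','] + 2)) none)

-- A's for-loop: scan for the first adjacent (STR SP,/POP) pair; `some` = the mutated list, `none` = loop fell through
def aStep : List String → Option (List String)
  | x :: y :: rest =>
    if PySem.Str.startswith x "STR SP, " && PySem.Str.startswith y "POP" then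
      some (aMov x y :: "INC SP, SP" :: rest)
    else (aStep (y :: rest)).map (x :: ·)
  | _ => none

-- A's tail recursion `return STRPOP(code)`; fuel length+1 suffices (each step removes one "STR SP, " line)
def aLoop : Nat → List String → List String
  | 0, code => code
  | f + 1, code =>
    match aStep code with
    | some c => aLoop f c
    | none => code

def STRPOP (code : List String) : List String := aLoop (code.length + 1) code

-- ===== PORT B =====
def bMov (x y : String) : String :=
  String.ofList ("MOV ".toList ++ PySem.Chars.slice y.toList (some 4) none ++ ", ".toList
    ++ PySem.Chars.slice x.toList (some 8) none)

-- B's while-loop: one pass, stepping by 2 over a rewritten pair and by 1 otherwise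
def STRPOP_alt : List String → List String
  | x :: y :: rest =>
    if PySem.Str.startswith x "STR SP, " && PySem.Str.startswith y "POP" then
      bMov x y :: "INC SP, SP" :: STRPOP_alt rest
    else x :: STRPOP_alt (y :: rest)
  | l => l

-- ===== PRECONDITION & SPEC =====
def Spec_STRPOP (code : List String) (out : List String) : Prop := out = STRPOP_alt code
instance (code : List String) (out : List String) : Decidable (Spec_STRPOP code out) := by unfold Spec_STRPOP; infer_instance

-- ===== CLAIM (what is proved, stated in full; the proofs are below) =====
def Claim_equal_STRPOP : Prop := ∀ (code : List String), Dom_STRPOP code → Spec_STRPOP code (STRPOP code)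

-- ===== LEMMAS AND PROOFS =====

-- number of lines still starting with "STR SP, " — each aStep removes exactly one
def strCount (l : List String) : Nat := l.countP (fun s => PySem.Str.startswith s "STR SP, ")

theorem toList_of_str (x : String) (h : PySem.Chars.startswith x.toList ['S','T','R',' ','S','P',',',' '] = true) :
    x.toList = 'S'::'T'::'R'::' '::'S'::'P'::','::' '::(x.toList.drop 8) := by
  rw [PySem.Chars.startswith_iff] at h
  obtain ⟨t, ht⟩ := h
  simp [← ht]

theorem find_comma_of_str (t : List Char) :
    PySem.Chars.find ('S'::'T'::'R'::' '::'S'::'P'::','::' '::t) [','] = 6 := by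
  simp [PySem.Chars.find, PySem.Chars.find.go, List.cons_prefix_cons]

theorem mov_eq (x y : String) (h : PySem.Chars.startswith x.toList ['S','T','R',' ','S','P',',',' '] = true) :
    aMov x y = bMov x y := by
  have hx := toList_of_str x h
  unfold aMov bMov
  rw [hx, find_comma_of_str]
  norm_num

theorem sw_bMov_str (x y : String) :
    PySem.Chars.startswith (bMov x y).toList ['S','T','R',' ','S','P',',',' '] = false := by
  simp [bMov, PySem.Chars.startswith, List.isPrefixOf]

theorem sw_bMov_pop (x y : String) :
    PySem.Chars.startswith (bMov x y).toList ['P','O','P'] = false := by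
  simp [bMov, PySem.Chars.startswith, List.isPrefixOf]

theorem sw_pop_not_str (y : String) (h : PySem.Chars.startswith y.toList ['P','O','P'] = true) :
    PySem.Chars.startswith y.toList ['S','T','R',' ','S','P',',',' '] = false := by
  rw [PySem.Chars.startswith_iff] at h
  obtain ⟨t, ht⟩ := h
  rw [← ht]
  simp [PySem.Chars.startswith, List.isPrefixOf]

theorem alt_cons (x : String) (t : List String)
    (h : PySem.Str.startswith x "STR SP, " = false) :
    STRPOP_alt (x :: t) = x :: STRPOP_alt t := by
  cases t with
  | nil => rfl
  | cons y r => simp only [STRPOP_alt, h, Bool.false_and, Bool.false_eq_true, if_false]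

theorem aStep_none (code : List String) (h : aStep code = none) :
    STRPOP_alt code = code := by
  induction code with
  | nil => rfl
  | cons x t ih =>
    cases t with
    | nil => rfl
    | cons y r =>
      simp only [aStep] at h
      cases hc : (PySem.Str.startswith x "STR SP, " && PySem.Str.startswith y "POP") with
      | true => rw [hc] at h; simp at h
      | false =>
        rw [hc] at h
        simp only [Bool.false_eq_true, if_false, Option.map_eq_none_iff] at h
        simp only [STRPOP_alt, hc, Bool.false_eq_true, if_false]
        rw [ih h]

theorem aStep_head (l c : List String) (h : aStep l = some c) :
    ∃ z t, c = z :: t ∧ (PySem.Str.startswith z "POP" = false ∨ some z = l.head?) := by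
  cases l with
  | nil => simp [aStep] at h
  | cons x t =>
    cases t with
    | nil => simp [aStep] at h
    | cons y r =>
      simp only [aStep] at h
      cases hc : (PySem.Str.startswith x "STR SP, " && PySem.Str.startswith y "POP") with
      | true =>
        rw [hc] at h
        simp only [if_true, Option.some_inj] at h
        refine ⟨aMov x y, "INC SP, SP" :: r, h.symm, Or.inl ?_⟩
        rw [mov_eq x y (by simpa using Bool.and_elim_left hc)]
        simpa using sw_bMov_pop x y
      | false =>
        rw [hc] at h
        simp only [Bool.false_eq_true, if_false, Option.map_eq_some_iff] at h
        obtain ⟨c', _, hcc⟩ := h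
        exact ⟨x, c', hcc.symm, Or.inr rfl⟩

theorem aStep_alt (code c : List String) (h : aStep code = some c) :
    STRPOP_alt c = STRPOP_alt code := by
  induction code generalizing c with
  | nil => simp [aStep] at h
  | cons x t ih =>
    cases t with
    | nil => simp [aStep] at h
    | cons y r =>
      simp only [aStep] at h
      cases hc : (PySem.Str.startswith x "STR SP, " && PySem.Str.startswith y "POP") with
      | true =>
        rw [hc] at h
        simp only [if_true, Option.some_inj] at h
        subst h
        rw [mov_eq x y (by simpa using Bool.and_elim_left hc)]
        rw [alt_cons _ _ (by simpa using sw_bMov_str x y), alt_cons _ _ (by decide)]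
        simp only [STRPOP_alt, hc, if_true]
      | false =>
        rw [hc] at h
        simp only [Bool.false_eq_true, if_false, Option.map_eq_some_iff] at h
        obtain ⟨c', hc', hcc⟩ := h
        subst hcc
        obtain ⟨z, tz, hz, hzc⟩ := aStep_head _ _ hc'
        subst hz
        have hxz : (PySem.Str.startswith x "STR SP, " && PySem.Str.startswith z "POP") = false := by
          rcases hzc with hp | hh
          · rw [hp, Bool.and_false]
          · simp only [List.head?_cons, Option.some_inj] at hh
            subst hh
            exact hc
        calc STRPOP_alt (x :: z :: tz)
            = x :: STRPOP_alt (z :: tz) := by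
              simp only [STRPOP_alt, hxz, Bool.false_eq_true, if_false]
          _ = x :: STRPOP_alt (y :: r) := by rw [ih _ hc']
          _ = STRPOP_alt (x :: y :: r) := by
              simp only [STRPOP_alt, hc, Bool.false_eq_true, if_false]

theorem aStep_count (code c : List String) (h : aStep code = some c) :
    strCount c + 1 = strCount code := by
  induction code generalizing c with
  | nil => simp [aStep] at h
  | cons x t ih =>
    cases t with
    | nil => simp [aStep] at h
    | cons y r =>
      simp only [aStep] at h
      cases hc : (PySem.Str.startswith x "STR SP, " && PySem.Str.startswith y "POP") with
      | true =>
        rw [hc] at h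
        simp only [if_true, Option.some_inj] at h
        subst h
        have h1 : PySem.Str.startswith x "STR SP, " = true := Bool.and_elim_left hc
        have h2 : PySem.Str.startswith y "STR SP, " = false := by
          simpa using sw_pop_not_str y (by simpa using Bool.and_elim_right hc)
        have hms : PySem.Str.startswith (bMov x y) "STR SP, " = false := by
          simpa using sw_bMov_str x y
        have h3 : PySem.Chars.startswith "INC SP, SP".toList "STR SP, ".toList = false := by decide
        rw [PySem.Str.startswith_eq] at h1 h2 hms
        simp only [strCount, List.countP_cons, mov_eq x y (by simpa using h1),
          PySem.Str.startswith_eq, hms, h1, h2, h3]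
        norm_num
      | false =>
        rw [hc] at h
        simp only [Bool.false_eq_true, if_false, Option.map_eq_some_iff] at h
        obtain ⟨c', hc', hcc⟩ := h
        subst hcc
        have := ih _ hc'
        simp only [strCount, List.countP_cons] at *
        omega

theorem aLoop_eq (f : Nat) (code : List String) (h : strCount code < f) :
    aLoop f code = STRPOP_alt code := by
  induction f generalizing code with
  | zero => omega
  | succ n ih =>
    cases hs : aStep code with
    | none =>
      have hl : aLoop (n + 1) code = code := by rw [aLoop, hs]
      rw [hl]
      exact (aStep_none code hs).symm
    | some c =>
      have hl : aLoop (n + 1) code = aLoop n c := by rw [aLoop, hs]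
      have hcnt := aStep_count code c hs
      rw [hl, ih c (by omega)]
      exact aStep_alt code c hs

-- ===== VERDICT (by name: the statement is the Claim_ definition above) =====
theorem STRPOP_spec : Claim_equal_STRPOP := by
  intro code _
  unfold Spec_STRPOP STRPOP
  exact aLoop_eq _ code (Nat.lt_succ_of_le List.countP_le_length)
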